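-- pv_equiv track=rewrite | github.com/Panlichen/kf-benchmarks | scripts/tf_cnn_benchmarks/allreduce.py | group_device_names
-- ===== SOURCE A (Python) =====
-- def group_device_names(devices, group_size):
--     """Group device names into groups of group_size.
--
--     Args:
--       devices: list of strings naming devices.
--       group_size: int >= 1
--
--     Returns:
--       list of lists of devices, where each inner list is group_size long,
--         and each device appears at least once in an inner list.  If
--         len(devices) % group_size = 0 then each device will appear
--         exactly once.
--
--     Raises:
--       ValueError: group_size > len(devices)
--     """
--     num_devices = len(devices)
--     if group_size > num_devices:
--         raise ValueError('only %d devices, but group_size=%d' % (num_devices, group_size))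
--     num_groups = (
--         num_devices // group_size + (1 if (num_devices % group_size != 0) else 0))
--     groups = [[] for _ in range(num_groups)]
--     for i in range(0, num_groups * group_size):
--         groups[i % num_groups].append(devices[i % num_devices])
--     return groups
-- ===== SOURCE B (Python) =====
-- def group_device_names(devices, group_size):
--     """Group device names into round-robin groups of group_size.
--
--     Builds the flat round-robin assignment first, chunks it into group_size
--     rows of length num_groups, and reads each group off as a column.
--     """
--     n = len(devices)
--     if group_size > n:
--         raise ValueError('only %d devices, but group_size=%d' % (n, group_size))
--     num_groups = -(-n // group_size)
--     flat = [devices[i % n] for i in range(num_groups * group_size)]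
--     rows = [flat[j * num_groups:(j + 1) * num_groups] for j in range(group_size)]
--     return [[row[g] for row in rows] for g in range(num_groups)]
-- ===== Notes on version B (the rewrite author's own statement) =====
-- stated objective: alternative
-- what changed: B builds the whole flat round-robin assignment as one list, chunks it into group_size contiguous rows of length num_groups (with num_groups computed as ceiling division -(-n // group_size)), and reads each group off as a column of that matrix, instead of A's scatter loop appending one device at a time into pre-allocated mutable group lists.
import Mathlib
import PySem

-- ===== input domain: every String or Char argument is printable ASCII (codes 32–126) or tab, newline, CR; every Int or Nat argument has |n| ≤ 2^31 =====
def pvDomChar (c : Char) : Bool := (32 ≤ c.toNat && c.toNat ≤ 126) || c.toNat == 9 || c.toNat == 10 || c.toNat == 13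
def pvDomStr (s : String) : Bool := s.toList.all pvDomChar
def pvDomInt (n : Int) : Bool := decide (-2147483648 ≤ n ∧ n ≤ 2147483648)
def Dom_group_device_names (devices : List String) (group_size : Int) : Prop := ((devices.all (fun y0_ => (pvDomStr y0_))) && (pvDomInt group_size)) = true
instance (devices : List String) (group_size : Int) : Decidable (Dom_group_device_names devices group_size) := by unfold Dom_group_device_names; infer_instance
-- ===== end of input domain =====

-- B replaces A's one-at-a-time scatter into mutable group lists by a staged pipeline:
-- build the flat round-robin list, chunk it into group_size rows, read groups off as
-- columns; objective: alternative decomposition, same cost.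

-- ===== PORT A =====
-- devices[i % num_devices] raises IndexError when num_devices = 0 and the loop is
-- nonempty, and `//`/`%` raise ZeroDivisionError when group_size = 0; those inputs
-- are outside Pre_ below, so the totalized pyGetD/floordiv/mod defaults are never hit there.
def group_device_names (devices : List String) (group_size : Int) : List (List String) :=
  let num_devices : Int := devices.length
  if group_size > num_devices then []    -- Python: raise ValueError (outside Pre_)
  else
    let num_groups : Int :=
      PySem.Int.floordiv num_devices group_size +
        (if PySem.Int.mod num_devices group_size ≠ 0 then 1 else 0)
    let groups : List (List String) := List.replicate num_groups.toNat []
    (PySem.List.pyRange 0 (num_groups * group_size) 1).foldl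
      (fun groups i =>
        groups.modify (PySem.Int.mod i num_groups).toNat
          (fun l => l ++ [PySem.List.pyGetD devices (PySem.Int.mod i num_devices) ""]))
      groups

-- ===== PORT B =====
-- Source B indexes row[g] always in range, so pyGetD's default is never used.
def group_device_names_alt (devices : List String) (group_size : Int) : List (List String) :=
  let n : Int := devices.length
  if group_size > n then []    -- Python: raise ValueError (outside Pre_)
  else
    let num_groups : Int := -(PySem.Int.floordiv (-n) group_size)
    let flat : List String :=
      (PySem.List.pyRange 0 (num_groups * group_size) 1).map
        (fun i => PySem.List.pyGetD devices (PySem.Int.mod i n) "")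
    let rows : List (List String) :=
      (PySem.List.pyRange 0 group_size 1).map
        (fun j => PySem.List.slice flat (some (j * num_groups)) (some ((j + 1) * num_groups)))
    (PySem.List.pyRange 0 num_groups 1).map
      (fun g => rows.map (fun row => PySem.List.pyGetD row g ""))

-- ===== PRECONDITION & SPEC =====
-- Pre_ excludes exactly the inputs where A raises: group_size > len(devices)
-- (ValueError), group_size = 0 (ZeroDivisionError), and -len(devices) ≤ group_size < 0
-- (IndexError); with group_size < -len(devices) the computed num_groups is 0 and A returns [].
def Pre_group_device_names (devices : List String) (group_size : Int) : Prop :=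
  (1 ≤ group_size ∧ group_size ≤ devices.length) ∨ (group_size < 0 ∧ (devices.length : Int) < -group_size)
instance (devices : List String) (group_size : Int) : Decidable (Pre_group_device_names devices group_size) := by unfold Pre_group_device_names; infer_instance
def pvWitness_group_device_names : List String × Int := (["a", "b", "c"], 2)

def Spec_group_device_names (devices : List String) (group_size : Int) (out : List (List String)) : Prop := out = group_device_names_alt devices group_size
instance (devices : List String) (group_size : Int) (out : List (List String)) : Decidable (Spec_group_device_names devices group_size out) := by unfold Spec_group_device_names; infer_instance

-- ===== CLAIM (what is proved, stated in full; the proofs are below) =====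
def Claim_equal_group_device_names : Prop := ∀ (devices : List String) (group_size : Int), Dom_group_device_names devices group_size → Pre_group_device_names devices group_size → Spec_group_device_names devices group_size (group_device_names devices group_size)

-- ===== LEMMAS AND PROOFS =====

-- A's scatter loop, in Nat form: after T steps, group g holds f over the indices ≡ g (mod N).
lemma scatter_foldl (f : Nat → String) (N : Nat) (_hN : 0 < N) :
    ∀ (T : Nat) (init : List (List String)), init.length = N →
      (List.range T).foldl (fun gs k => gs.modify (k % N) (· ++ [f k])) init
        = (List.range N).map (fun g =>
            init.getD g [] ++ ((List.range T).filter (fun k => k % N == g)).map f) := by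
  intro T
  induction T with
  | zero =>
    intro init hlen
    simp only [List.range_zero, List.foldl_nil, List.filter_nil, List.map_nil, List.append_nil]
    apply List.ext_getElem (by simpa using hlen)
    intro i h1 h2
    simp [List.getD_eq_getElem?_getD, List.getElem?_eq_getElem (by omega : i < init.length)]
  | succ T ih =>
    intro init hlen
    rw [List.range_succ, List.foldl_append, List.foldl_cons, List.foldl_nil, ih init hlen]
    apply List.ext_getElem (by simp)
    intro i h1 h2
    have hiN : i < N := by simpa using h2
    rw [List.getElem_modify]
    simp only [List.getElem_map, List.getElem_range, List.filter_append,
      List.map_append]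
    by_cases hc : T % N = i
    · simp [hc]
    · have : (T % N == i) = false := by simpa using hc
      simp [this, hc]

-- the indices ≡ g (mod N) below N*m are exactly g, g+N, …, g+(m-1)N
lemma filter_range_mod (N g : Nat) (hg : g < N) :
    ∀ m : Nat, (List.range (N * m)).filter (fun k => k % N == g)
      = (List.range m).map (fun j => g + N * j) := by
  intro m
  induction m with
  | zero => simp
  | succ m ih =>
    have hsplit : N * (m + 1) = N * m + N := by ring
    rw [hsplit, List.range_add, List.filter_append, ih, List.filter_map]
    have hcongr : (List.range N).filter ((fun k => k % N == g) ∘ (fun x => N * m + x))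
        = (List.range N).filter (fun j => j == g) := by
      apply List.filter_congr
      intro j hj
      have hjN : j < N := by simpa using hj
      simp [Function.comp, Nat.mod_eq_of_lt hjN]
    rw [hcongr]
    have hfe : (List.range N).filter (fun j => j == g) = [g] := by
      have : (List.range N).filter (fun x => decide (x = g)) = List.replicate (List.count g (List.range N)) g := List.filter_eq g
      simpa [List.count_range, hg] using this
    rw [hfe, List.range_succ, List.map_append]
    simp [Nat.add_comm]


-- getD through take/drop of a long-enough list
lemma getD_take_drop (L : List String) (a b i : Nat) (hi : i < b) (hab : a + b ≤ L.length) :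
    ((L.drop a).take b).getD i "" = L.getD (a + i) "" := by
  have h1 : i < ((L.drop a).take b).length := by
    simp only [List.length_take, List.length_drop]; omega
  have h2 : a + i < L.length := by omega
  rw [List.getD_eq_getElem?_getD, List.getElem?_eq_getElem h1,
    List.getD_eq_getElem?_getD, List.getElem?_eq_getElem h2]
  simp [List.getElem_take, List.getElem_drop]

-- ===== VERDICT (by name: the statement is the Claim_ definition above) =====
theorem group_device_names_spec : Claim_equal_group_device_names := by
  intro devices group_size _ hpre
  unfold Spec_group_device_names group_device_names group_device_names_alt
  rcases hpre with ⟨hg1, hg2⟩ | ⟨hdev, hlt⟩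
  · -- main case: 1 ≤ group_size ≤ len(devices)
    obtain ⟨gN, rfl⟩ : ∃ gN : Nat, group_size = (gN : Int) :=
      ⟨group_size.toNat, (Int.toNat_of_nonneg (by omega)).symm⟩
    have hgN1 : 1 ≤ gN := by exact_mod_cast hg1
    have hgNn : gN ≤ devices.length := by exact_mod_cast hg2
    have hn0 : 0 < devices.length := lt_of_lt_of_le hgN1 hgNn
    have hcond : ¬ ((gN : Int) > (devices.length : Int)) := by omega
    simp only [if_neg hcond]
    have hNpos : 0 < devices.length / gN + (if devices.length % gN ≠ 0 then 1 else 0) := by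
      have : 1 ≤ devices.length / gN := (Nat.one_le_div_iff (by omega)).2 hgNn
      omega
    have hNG : PySem.Int.floordiv (devices.length : Int) (gN : Int) +
        (if PySem.Int.mod (devices.length : Int) (gN : Int) ≠ 0 then (1 : Int) else 0)
        = ((devices.length / gN + (if devices.length % gN ≠ 0 then 1 else 0) : Nat) : Int) := by
      rw [PySem.Int.floordiv_natCast, PySem.Int.mod_natCast]
      by_cases h : devices.length % gN = 0
      · simp [h]
      · rw [if_pos (by exact_mod_cast h), if_pos h]; norm_cast
    -- B's ceiling division computes the same num_groups
    have hdm := Nat.div_add_mod devices.length gN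
    have hmlt : devices.length % gN < gN := Nat.mod_lt _ (by omega)
    have hNB : -(PySem.Int.floordiv (-(devices.length : Int)) (gN : Int))
        = ((devices.length / gN + (if devices.length % gN ≠ 0 then 1 else 0) : Nat) : Int) := by
      rw [PySem.Int.neg_floordiv_neg_eq_iff_of_pos (by exact_mod_cast hgN1 : (0:Int) < (gN:Int))]
      by_cases h : devices.length % gN = 0
      · have hq1 : 1 ≤ devices.length / gN := (Nat.one_le_div_iff (by omega)).2 hgNn
        have hneq : (devices.length : Int) = (gN : Int) * ((devices.length / gN : Nat) : Int) := by
          exact_mod_cast (by omega : devices.length = gN * (devices.length / gN))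
        simp only [h, ne_eq, not_true_eq_false, if_false, Nat.add_zero]
        constructor
        · rw [hneq]; push_cast
          have : (1 : Int) ≤ ((devices.length / gN : Nat) : Int) := by exact_mod_cast hq1
          nlinarith [show (1:Int) ≤ (gN:Int) by exact_mod_cast hgN1]
        · rw [hneq]; ring_nf; omega
      · have hr1 : 1 ≤ devices.length % gN := Nat.one_le_iff_ne_zero.2 h
        have hneq : (devices.length : Int)
            = (gN : Int) * ((devices.length / gN : Nat) : Int) + ((devices.length % gN : Nat) : Int) := by
          exact_mod_cast hdm.symm
        simp only [h, ne_eq, not_false_eq_true, if_true]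
        constructor
        · rw [hneq]; push_cast; ring_nf
          have h1 : (1 : Int) ≤ ((devices.length % gN : Nat) : Int) := by exact_mod_cast hr1
          nlinarith
        · rw [hneq]; push_cast
          have h2 : ((devices.length % gN : Nat) : Int) ≤ (gN : Int) := by
            exact_mod_cast le_of_lt hmlt
          nlinarith
    rw [hNG, hNB]
    generalize hNd : devices.length / gN + (if devices.length % gN ≠ 0 then 1 else 0) = N
    rw [hNd] at hNpos
    have htot : ((N : Nat) : Int) * (gN : Int) = ((N * gN : Nat) : Int) := by push_cast; ring
    rw [htot]
    -- A side: Nat-ify the foldl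
    have hA :
        (PySem.List.pyRange 0 (((N * gN : Nat) : Nat) : Int) 1).foldl
          (fun groups i =>
            groups.modify (PySem.Int.mod i ((N : Nat) : Int)).toNat
              (fun l => l ++ [PySem.List.pyGetD devices (PySem.Int.mod i (devices.length : Int)) ""]))
          (List.replicate (((N : Nat) : Int)).toNat [])
        = (List.range (N * gN)).foldl
            (fun gs k => gs.modify (k % N) (· ++ [devices.getD (k % devices.length) ""]))
            (List.replicate N []) := by
      rw [PySem.List.pyRange_one]
      simp only [sub_zero, Int.toNat_natCast, zero_add, List.foldl_map]
      congr 1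
      funext gs k
      rw [PySem.Int.mod_natCast, PySem.Int.mod_natCast, Int.toNat_natCast,
        PySem.List.pyGetD_natCast]
    rw [hA, scatter_foldl _ N hNpos (N * gN) (List.replicate N []) (by simp)]
    -- B side: flat is the Nat-indexed round-robin list
    rw [show (PySem.List.pyRange 0 ((N * gN : Nat) : Int) 1).map
          (fun i => PySem.List.pyGetD devices (PySem.Int.mod i (devices.length : Int)) "")
        = (List.range (N * gN)).map (fun k => devices.getD (k % devices.length) "") from by
      rw [PySem.List.pyRange_one]
      simp only [sub_zero, Int.toNat_natCast, zero_add, List.map_map]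
      apply List.map_congr_left
      intro k _
      simp only [Function.comp]
      rw [PySem.Int.mod_natCast, PySem.List.pyGetD_natCast]]
    generalize hFL : (List.range (N * gN)).map (fun k => devices.getD (k % devices.length) "") = flatL
    have hFLlen : flatL.length = N * gN := by rw [← hFL]; simp
    have hFLget : ∀ k : Nat, k < N * gN → flatL.getD k "" = devices.getD (k % devices.length) "" := by
      intro k hk
      rw [← hFL, List.getD_eq_getElem?_getD,
        List.getElem?_eq_getElem (by simpa using hk)]
      simp
    -- both sides are maps over range N; compare pointwise
    rw [PySem.List.pyRange_one, PySem.List.pyRange_one]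
    simp only [sub_zero, Int.toNat_natCast, zero_add, List.map_map]
    apply List.map_congr_left
    intro g hg
    have hgN : g < N := by simpa using hg
    simp only [Function.comp]
    rw [filter_range_mod N g hgN gN, List.map_map,
      show (List.replicate N ([] : List String)).getD g [] = [] from by
        simp [List.getD_eq_getElem?_getD, hgN],
      List.nil_append]
    apply List.map_congr_left
    intro j hj
    have hjg : j < gN := by simpa using hj
    simp only [Function.comp]
    -- B's entry: row j, column g
    have e1 : ((j : Int) * (N : Int)) = ((j * N : Nat) : Int) := by push_cast; ring
    have e2 : (((j : Int) + 1) * (N : Int)) = ((j * N : Nat) : Int) + ((N : Nat) : Int) := by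
      push_cast; ring
    rw [e1, e2, PySem.List.slice_natCast_add, PySem.List.pyGetD_natCast,
      getD_take_drop flatL (j * N) N g hgN
        (by rw [hFLlen]; calc j * N + N = (j + 1) * N := by ring
              _ ≤ gN * N := Nat.mul_le_mul_right N hjg
              _ = N * gN := Nat.mul_comm _ _),
      hFLget (j * N + g) (by calc j * N + g < j * N + N := by omega
              _ = (j + 1) * N := by ring
              _ ≤ gN * N := Nat.mul_le_mul_right N hjg
              _ = N * gN := Nat.mul_comm _ _)]
    congr 2
    ring
  · -- group_size < 0 and len(devices) < -group_size: num_groups = 0, both return []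
    have hcond : ¬ (group_size > (devices.length : Int)) := by
      have : (0 : Int) ≤ devices.length := Int.natCast_nonneg _
      omega
    simp only [if_neg hcond]
    have hng : PySem.Int.floordiv (devices.length : Int) group_size +
        (if PySem.Int.mod (devices.length : Int) group_size ≠ 0 then (1 : Int) else 0) = 0 := by
      by_cases hn : devices.length = 0
      · simp [hn, PySem.Int.floordiv, PySem.Int.mod, Int.zero_fdiv, Int.zero_fmod]
      · have hnpos : (0 : Int) < devices.length := by exact_mod_cast Nat.pos_of_ne_zero hn
        have hmb := PySem.Int.mod_neg_bounds (devices.length : Int) hdev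
        have hid := PySem.Int.floordiv_mul_add_mod (devices.length : Int) group_size
        have hd : PySem.Int.floordiv (devices.length : Int) group_size = -1 := by
          rcases lt_trichotomy (PySem.Int.floordiv (devices.length : Int) group_size) (-1) with h | h | h
          · have := mul_le_mul_of_nonpos_right
              (show PySem.Int.floordiv (devices.length : Int) group_size ≤ -2 by omega)
              (le_of_lt hdev)
            linarith [hmb.1, hmb.2]
          · exact h
          · have := mul_nonpos_of_nonneg_of_nonpos
              (show (0 : Int) ≤ PySem.Int.floordiv (devices.length : Int) group_size by omega)
              (le_of_lt hdev)
            linarith [hmb.2]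
        have hm : PySem.Int.mod (devices.length : Int) group_size
            = (devices.length : Int) + group_size := by rw [hd] at hid; linarith
        rw [if_pos (by rw [hm]; omega), hd]
        norm_num
    have hngB : -(PySem.Int.floordiv (-(devices.length : Int)) group_size) = 0 := by
      have hmb := PySem.Int.mod_neg_bounds (-(devices.length : Int)) hdev
      have hid := PySem.Int.floordiv_mul_add_mod (-(devices.length : Int)) group_size
      have hn0' : (0 : Int) ≤ devices.length := Int.natCast_nonneg _
      have hd0 : PySem.Int.floordiv (-(devices.length : Int)) group_size = 0 := by
        rcases lt_trichotomy (PySem.Int.floordiv (-(devices.length : Int)) group_size) 0 with h | h | h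
        · have h1 : (0 : Int) ≤ (-(PySem.Int.floordiv (-(devices.length : Int)) group_size + 1)) * (-group_size) :=
            mul_nonneg (by omega) (by omega)
          nlinarith [hmb.1, hmb.2, hid]
        · exact h
        · have h1 : (0 : Int) ≤ (PySem.Int.floordiv (-(devices.length : Int)) group_size - 1) * (-group_size) :=
            mul_nonneg (by omega) (by omega)
          nlinarith [hmb.1, hmb.2, hid]
      rw [hd0]; ring
    rw [hng, hngB]
    simp
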